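-- pv_equiv track=rewrite | github.com/ChialeKuan/blockchain-demo | lib/crypto.py | get_tree_neighbor_indexes
-- ===== SOURCE A (Python) =====
-- from math import ceil
--
-- def get_tree_neighbor_indexes(index: int, size: int) -> list:
--     assert index < size
--     if size == 0:
--         return []
--     if size == 1:
--         return []
--     res = []
--     i = 0
--     while size != 1:
--         if index % 2 == 1:
--             res.append((i, index - 1))
--         else:
--             res.append((i, index + 1))
--         index = index // 2
--         size = ceil(size / 2)
--         i = i + 1
--     return res
-- ===== SOURCE B (Python) =====
-- def get_tree_neighbor_indexes(index: int, size: int) -> list: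
--     assert index < size
--     if size <= 1:
--         return []
--     upper = get_tree_neighbor_indexes(index >> 1, (size + 1) // 2)
--     return [(0, index + 1 - 2 * (index % 2))] + [(i + 1, j) for (i, j) in upper]
-- ===== Notes on version B (the rewrite author's own statement) =====
-- stated objective: alternative
-- what changed: Replaces A's iterative accumulator loop (halving index and size in mutable state while appending) by structural recursion on the halved problem: one branch-free sibling formula index+1-2*(index%2) at the current level, then a recursive call on (index>>1, ceil(size/2)) whose levels are renumbered +1.
import Mathlib
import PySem

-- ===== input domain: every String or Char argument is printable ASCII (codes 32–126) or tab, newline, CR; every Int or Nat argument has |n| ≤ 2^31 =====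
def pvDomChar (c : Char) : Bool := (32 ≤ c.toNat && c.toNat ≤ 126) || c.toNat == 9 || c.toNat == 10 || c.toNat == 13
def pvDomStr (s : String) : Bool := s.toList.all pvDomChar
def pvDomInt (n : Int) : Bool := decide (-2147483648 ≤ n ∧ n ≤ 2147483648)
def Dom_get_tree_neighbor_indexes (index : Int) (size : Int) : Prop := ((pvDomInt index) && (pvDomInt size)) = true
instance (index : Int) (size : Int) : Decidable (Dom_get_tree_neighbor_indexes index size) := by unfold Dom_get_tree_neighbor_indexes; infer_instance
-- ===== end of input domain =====

-- B replaces A's iterative accumulator loop by structural recursion on the halved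
-- problem, with a branch-free sibling formula ("alternative").

-- ===== PORT A =====
-- math.ceil(size / 2) = -((-size) // 2); exact for Int sizes (|size| ≤ 2^31 < 2^53, the float is exact)
def pyCeilHalf (s : Int) : Int := -(PySem.Int.floordiv (-s) 2)

-- the 'while size != 1' loop; fuel only makes the recursion total (unused on Pre_ inputs)
def loopA : Nat → Int → Int → Int → List (Int × Int) → List (Int × Int)
  | 0, _, _, _, res => res
  | fuel + 1, index, size, i, res =>
    if size ≠ 1 then
      loopA fuel (PySem.Int.floordiv index 2) (pyCeilHalf size) (i + 1)
        (res ++ [if PySem.Int.mod index 2 = 1 then (i, index - 1) else (i, index + 1)])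
    else res

def get_tree_neighbor_indexes (index : Int) (size : Int) : List (Int × Int) :=
  -- 'assert index < size' raises outside Pre_; size == 0 / size == 1 guards as in A
  if size = 0 then []
  else if size = 1 then []
  else loopA (size.toNat + 1) index size 0 []

-- ===== PORT B =====
def get_tree_neighbor_indexes_alt (index : Int) (size : Int) : List (Int × Int) :=
  if size ≤ 1 then []
  else
    -- recursive call 'upper' on (index >> 1, (size + 1) // 2), levels renumbered +1
    (0, index + 1 - 2 * PySem.Int.mod index 2) ::
      (get_tree_neighbor_indexes_alt (index >>> (1 : Nat)) (PySem.Int.floordiv (size + 1) 2)).map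
        (fun p => (p.1 + 1, p.2))
termination_by size.toNat
decreasing_by
  rw [PySem.Int.floordiv_eq_ediv_of_pos (by norm_num : (0:Int) < 2)]
  omega

-- ===== PRECONDITION & SPEC =====
-- Pre_ excludes exactly where A does not return: index ≥ size (AssertionError) and
-- size < 0 (the halving loop never reaches 1 and diverges).
def Pre_get_tree_neighbor_indexes (index : Int) (size : Int) : Prop := index < size ∧ 0 ≤ size
instance (index : Int) (size : Int) : Decidable (Pre_get_tree_neighbor_indexes index size) := by unfold Pre_get_tree_neighbor_indexes; infer_instance
def pvWitness_get_tree_neighbor_indexes : Int × Int := (2, 5)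

def Spec_get_tree_neighbor_indexes (index : Int) (size : Int) (out : List (Int × Int)) : Prop := out = get_tree_neighbor_indexes_alt index size
instance (index : Int) (size : Int) (out : List (Int × Int)) : Decidable (Spec_get_tree_neighbor_indexes index size out) := by unfold Spec_get_tree_neighbor_indexes; infer_instance

-- ===== CLAIM (what is proved, stated in full; the proofs are below) =====
def Claim_equal_get_tree_neighbor_indexes : Prop := ∀ (index : Int) (size : Int), Dom_get_tree_neighbor_indexes index size → Pre_get_tree_neighbor_indexes index size → Spec_get_tree_neighbor_indexes index size (get_tree_neighbor_indexes index size)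

-- ===== LEMMAS AND PROOFS =====

-- Both programs are characterised against the same closed form: level j carries
-- (j, index >>> j ∓ 1) for j < bitLength (size - 1).
def levelPair (index : Int) (j : Nat) : Int × Int :=
  if PySem.Int.mod (index >>> j) 2 = 1 then ((j : Int), index >>> j - 1)
  else ((j : Int), index >>> j + 1)

lemma shiftRight_eq_ediv_pow (a : Int) (k : Nat) : a >>> k = a / 2 ^ k := by
  simp [Int.shiftRight_eq_div_pow]

lemma floordiv_two_shift (a : Int) (j : Nat) :
    (PySem.Int.floordiv a 2) >>> j = a >>> (j + 1) := by
  rw [PySem.Int.floordiv_eq_ediv_of_pos (by norm_num : (0:Int) < 2)]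
  rw [shiftRight_eq_ediv_pow, shiftRight_eq_ediv_pow]
  rw [Int.ediv_ediv_of_nonneg (by norm_num : (0:Int) ≤ 2)]
  norm_num [pow_succ, mul_comm]

lemma shiftRight_one_eq_floordiv (a : Int) : a >>> (1 : Nat) = PySem.Int.floordiv a 2 := by
  rw [PySem.Int.floordiv_eq_ediv_of_pos (by norm_num : (0:Int) < 2), shiftRight_eq_ediv_pow]
  norm_num

lemma pyCeilHalf_sub_one (s : Int) :
    pyCeilHalf s - 1 = PySem.Int.floordiv (s - 1) 2 := by
  unfold pyCeilHalf
  rw [PySem.Int.floordiv_eq_ediv_of_pos (by norm_num : (0:Int) < 2),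
      PySem.Int.floordiv_eq_ediv_of_pos (by norm_num : (0:Int) < 2)]
  omega

lemma pyCeilHalf_pos {s : Int} (hs : 2 ≤ s) : 1 ≤ pyCeilHalf s := by
  unfold pyCeilHalf
  rw [PySem.Int.floordiv_eq_ediv_of_pos (by norm_num : (0:Int) < 2)]
  omega

lemma bitLength_eq_zero {n : Int} (h : PySem.Int.bitLength n = 0) : n = 0 := by
  have := PySem.Int.lt_two_pow_bitLength n
  rw [h] at this
  omega

lemma loopA_eq (fuel : Nat) : ∀ (index size i : Int) (res : List (Int × Int)),
    1 ≤ size → PySem.Int.bitLength (size - 1) ≤ fuel →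
    loopA fuel index size i res =
      res ++ (List.range (PySem.Int.bitLength (size - 1))).map (fun (j : Nat) =>
        (i + (j : Int), (levelPair index j).2)) := by
  induction fuel with
  | zero =>
    intro index size i res h1 h2
    have h0 : size - 1 = 0 := bitLength_eq_zero (Nat.le_zero.mp h2)
    have hs : size = 1 := by omega
    simp [loopA, hs]
  | succ f ih =>
    intro index size i res h1 h2
    by_cases hs : size = 1
    · simp [loopA, hs]
    · have hs2 : 2 ≤ size := by omega
      have hc := pyCeilHalf_sub_one size
      have hp : 1 ≤ pyCeilHalf size := pyCeilHalf_pos hs2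
      have hbl : PySem.Int.bitLength (size - 1)
          = PySem.Int.bitLength (pyCeilHalf size - 1) + 1 := by
        rw [hc]
        exact PySem.Int.bitLength_of_pos (by omega : (0:Int) < size - 1)
      have hf : PySem.Int.bitLength (pyCeilHalf size - 1) ≤ f := by omega
      have hrec := ih (PySem.Int.floordiv index 2) (pyCeilHalf size) (i + 1)
        (res ++ [if PySem.Int.mod index 2 = 1 then (i, index - 1) else (i, index + 1)])
        hp hf
      show loopA (f + 1) index size i res = _
      rw [show loopA (f + 1) index size i res
            = loopA f (PySem.Int.floordiv index 2) (pyCeilHalf size) (i + 1)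
                (res ++ [if PySem.Int.mod index 2 = 1 then (i, index - 1) else (i, index + 1)])
          from by simp [loopA, hs]]
      rw [hrec, hbl, List.range_succ_eq_map, List.map_cons, List.map_map, List.append_assoc]
      congr 1
      have h0 : index >>> (0 : Nat) = index := by simp
      simp only [List.cons_append, List.nil_append, levelPair, h0, Int.natCast_zero, add_zero]
      congr 1
      · split_ifs <;> simp
      apply List.map_congr_left
      intro j _
      simp only [Function.comp_apply, floordiv_two_shift]
      have : i + 1 + (j : Int) = i + ((j + 1 : Nat) : Int) := by push_cast; ring
      split_ifs <;> simp [this]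

lemma bitLength_le_toNat_succ {size : Int} (hs : 2 ≤ size) :
    PySem.Int.bitLength (size - 1) ≤ size.toNat + 1 := by
  by_contra hlt
  have hb := PySem.Int.two_pow_bitLength_le (size - 1) (by omega : size - 1 ≠ 0)
  have hna : (size - 1).natAbs ≤ size.toNat := by omega
  have h1 : size.toNat ≤ PySem.Int.bitLength (size - 1) - 1 := by omega
  have h2 : 2 ^ size.toNat ≤ 2 ^ (PySem.Int.bitLength (size - 1) - 1) :=
    Nat.pow_le_pow_right (by norm_num) h1
  have h3 : size.toNat < 2 ^ size.toNat := Nat.lt_two_pow_self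
  omega

-- B computes the same closed form, by strong induction along its recursion
lemma altB_eq : ∀ (n : Nat) (index size : Int), size.toNat ≤ n → 1 ≤ size →
    get_tree_neighbor_indexes_alt index size =
      (List.range (PySem.Int.bitLength (size - 1))).map (levelPair index) := by
  intro n
  induction n with
  | zero => intro index size hle h1; omega
  | succ m ih =>
    intro index size hle h1
    by_cases hs : size = 1
    · rw [get_tree_neighbor_indexes_alt]
      simp [hs, PySem.Int.bitLength_zero]
    · have hs2 : 2 ≤ size := by omega
      have hhalf : PySem.Int.floordiv (size + 1) 2 = pyCeilHalf size := by
        unfold pyCeilHalf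
        rw [PySem.Int.floordiv_eq_ediv_of_pos (by norm_num : (0:Int) < 2),
            PySem.Int.floordiv_eq_ediv_of_pos (by norm_num : (0:Int) < 2)]
        omega
      have hp : 1 ≤ pyCeilHalf size := pyCeilHalf_pos hs2
      have hlt : (pyCeilHalf size).toNat ≤ m := by
        unfold pyCeilHalf at *
        rw [PySem.Int.floordiv_eq_ediv_of_pos (by norm_num : (0:Int) < 2)] at *
        omega
      have hbl : PySem.Int.bitLength (size - 1)
          = PySem.Int.bitLength (pyCeilHalf size - 1) + 1 := by
        rw [pyCeilHalf_sub_one]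
        exact PySem.Int.bitLength_of_pos (by omega : (0:Int) < size - 1)
      rw [get_tree_neighbor_indexes_alt]
      rw [if_neg (by omega : ¬ size ≤ 1), hhalf,
          ih (index >>> (1 : Nat)) (pyCeilHalf size) hlt hp,
          hbl, List.range_succ_eq_map, List.map_cons, List.map_map, List.map_map]
      have hhead : (0, index + 1 - 2 * PySem.Int.mod index 2) = levelPair index 0 := by
        have h0 : index >>> (0 : Nat) = index := by simp
        simp only [levelPair, h0, Int.natCast_zero]
        rcases PySem.Int.mod_two_eq index with h | h <;> rw [h] <;> norm_num; omega
      rw [hhead]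
      congr 1
      apply List.map_congr_left
      intro j _
      simp only [Function.comp_apply, levelPair, shiftRight_one_eq_floordiv,
        floordiv_two_shift]
      split_ifs <;> exact Prod.ext (by push_cast; ring) rfl

-- ===== VERDICT (by name: the statement is the Claim_ definition above) =====
theorem get_tree_neighbor_indexes_spec : Claim_equal_get_tree_neighbor_indexes := by
  intro index size _ hpre
  obtain ⟨hlt, hnn⟩ := hpre
  unfold Spec_get_tree_neighbor_indexes get_tree_neighbor_indexes
  by_cases h0 : size = 0
  · rw [get_tree_neighbor_indexes_alt]
    simp [h0]
  · by_cases h1 : size = 1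
    · rw [get_tree_neighbor_indexes_alt]
      simp [h1]
    · have hs2 : 2 ≤ size := by omega
      rw [if_neg h0, if_neg h1,
          loopA_eq (size.toNat + 1) index size 0 [] (by omega)
            (bitLength_le_toNat_succ hs2),
          altB_eq size.toNat index size (le_refl _) (by omega)]
      simp only [List.nil_append, zero_add]
      apply List.map_congr_left
      intro j _
      simp only [levelPair]
      split_ifs <;> rfl
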